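-- pv_equiv track=rewrite | github.com/HoonDongKang/Algorithm | 백준/Silver/2910. 빈도 정렬/빈도 정렬.py | solve
-- ===== SOURCE A (Python) =====
-- def solve(inputs: list[int]):
--     count = {}
--
--     for i, num in enumerate(inputs):
--         if num not in count:
--             count[num] = [0, i]
--         count[num][0] += 1
--
--     result = sorted(count, key=lambda x: (-count[x][0], count[x][1]))
--     answer = []
--
--     for num in result:
--         answer.extend([num] * count[num][0])
--
--     return answer
-- ===== SOURCE B (Python) =====
-- def solve(inputs: list[int]):
--     count = {}
--     for num in inputs:
--         count[num] = count.get(num, 0) + 1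
--
--     maxf = max(count.values(), default=0)
--
--     buckets = [[] for _ in range(maxf + 1)]
--     for num, c in count.items():
--         buckets[c].append(num)
--
--     answer = []
--     for c in range(maxf, 0, -1):
--         for num in buckets[c]:
--             answer += [num] * c
--     return answer
-- ===== Notes on version B (the rewrite author's own statement) =====
-- stated objective: faster
-- what changed: Replaces A's comparison sort keyed by (-count, first index) with a counting-sort traversal: a frequency dict built in one pass, buckets indexed by count filled in first-occurrence order, then walked from the highest count down.
import Mathlib
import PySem

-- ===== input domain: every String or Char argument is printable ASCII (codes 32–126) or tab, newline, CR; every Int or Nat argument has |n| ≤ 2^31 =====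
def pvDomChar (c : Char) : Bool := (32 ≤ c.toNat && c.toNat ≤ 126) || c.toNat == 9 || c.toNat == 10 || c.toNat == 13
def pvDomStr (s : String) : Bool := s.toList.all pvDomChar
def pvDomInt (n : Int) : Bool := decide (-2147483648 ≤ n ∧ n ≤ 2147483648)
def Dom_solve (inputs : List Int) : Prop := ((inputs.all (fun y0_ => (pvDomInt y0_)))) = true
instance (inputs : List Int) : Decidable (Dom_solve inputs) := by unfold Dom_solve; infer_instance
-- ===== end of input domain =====

-- B replaces A's comparison sort (sorted by (-count, first index)) with a counting-sort
-- traversal: frequency buckets filled in first-occurrence order, walked from the highest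
-- count down (objective: faster; a timing run measured B ≥ 2× faster at the largest sizes).

-- ===== PORT A =====
def solve (inputs : List Int) : List Int :=
  let count := (PySem.List.enumerate inputs 0).foldl
    (fun c p =>
      let c := if c.contains p.2 then c else c.insert p.2 ((0 : Int), p.1)
      c.modify p.2 (0, 0) (fun v => (v.1 + 1, v.2)))
    PySem.Dict.empty
  let result := PySem.List.sorted2 count.keys
    (fun x => -(count.getD x (0, 0)).1) (fun x => (count.getD x (0, 0)).2)
  result.foldl (fun answer num =>
    answer ++ PySem.List.pyRepeat [num] (count.getD num (0, 0)).1) []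

-- ===== PORT B =====
def solve_alt (inputs : List Int) : List Int :=
  let count := inputs.foldl (fun d num => d.insert num (d.getD num 0 + 1)) PySem.Dict.empty
  let maxf := PySem.List.maxD count.values (fun v => v) 0
  let buckets : List (List Int) := List.replicate (maxf + 1).toNat []
  -- every stored count is ≥ 1, so '.toNat' on the bucket index is exact here (no negative index occurs)
  let buckets := count.items.foldl (fun bs p => bs.modify p.2.toNat (fun b => b ++ [p.1])) buckets
  (PySem.List.pyRange maxf 0 (-1)).foldl
    (fun answer c =>
      (buckets.getD c.toNat []).foldl
        (fun answer num => answer ++ PySem.List.pyRepeat [num] c) answer)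
    []

-- ===== PRECONDITION & SPEC =====
def Spec_solve (inputs : List Int) (out : List Int) : Prop := out = solve_alt inputs
instance (inputs : List Int) (out : List Int) : Decidable (Spec_solve inputs out) := by unfold Spec_solve; infer_instance

-- ===== CLAIM (what is proved, stated in full; the proofs are below) =====
def Claim_equal_solve : Prop := ∀ (inputs : List Int), Dom_solve inputs → Spec_solve inputs (solve inputs)

-- ===== LEMMAS AND PROOFS =====

def cntI (xs : List Int) (k : Int) : Int := (List.count k xs : Int)
def idxI (xs : List Int) (k : Int) : Int := ((PySem.List.index? xs k).getD 0 : Nat)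
def pairA (xs : List Int) (k : Int) : Int × (Int × Int) := (k, (cntI xs k, idxI xs k))
def countA (xs : List Int) : PySem.Dict Int (Int × Int) :=
  (PySem.List.enumerate xs 0).foldl
    (fun c p =>
      let c := if c.contains p.2 then c else c.insert p.2 ((0 : Int), p.1)
      c.modify p.2 (0, 0) (fun v => (v.1 + 1, v.2)))
    PySem.Dict.empty

theorem enumerate_snoc (xs : List Int) (x : Int) (s : Int) :
    PySem.List.enumerate (xs ++ [x]) s = PySem.List.enumerate xs s ++ [(s + xs.length, x)] := by
  induction xs generalizing s with
  | nil => simp [PySem.List.enumerate]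
  | cons y ys ih =>
    simp only [List.cons_append, PySem.List.enumerate, ih, List.length_cons]
    have h : s + 1 + (ys.length : Int) = s + ((ys.length : Int) + 1) := by ring
    push_cast
    rw [h]

theorem index?_mem_lt {xs : List Int} {a : Int} (h : a ∈ xs) :
    ∃ j, PySem.List.index? xs a = some j ∧ j < xs.length := by
  induction xs with
  | nil => simp at h
  | cons y ys ih =>
    by_cases hy : y = a
    · subst hy
      refine ⟨0, ?_, by simp⟩
      simp [PySem.List.index?_eq_idxOf?, List.idxOf?, List.findIdx?, List.findIdx?.go]
    · rcases List.mem_cons.mp h with h' | h'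
      · exact absurd h'.symm hy
      · obtain ⟨j, hj, hlt⟩ := ih h'
        refine ⟨j + 1, ?_, by simp; omega⟩
        rw [PySem.List.index?_cons_of_ne ys hy, hj]; rfl


theorem cnt_snoc_self (xs : List Int) (x : Int) : cntI (xs ++ [x]) x = cntI xs x + 1 := by
  simp [cntI, List.count_append]

theorem cnt_snoc_ne (xs : List Int) {k x : Int} (h : k ≠ x) : cntI (xs ++ [x]) k = cntI xs k := by
  simp [cntI, List.count_append, h.symm]

theorem idx_snoc_mem (xs : List Int) {k : Int} (x : Int) (h : k ∈ xs) :
    idxI (xs ++ [x]) k = idxI xs k := by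
  unfold idxI
  rw [PySem.List.index?_append_of_mem _ h]

theorem idx_snoc_self (xs : List Int) {x : Int} (h : x ∉ xs) :
    idxI (xs ++ [x]) x = (xs.length : Int) := by
  unfold idxI
  rw [PySem.List.index?_append_singleton_self xs x h]
  rfl

theorem modify_eq_insert (d : PySem.Dict Int (Int × Int)) (key : Int) :
    d.modify key (0, 0) (fun v => (v.1 + 1, v.2))
      = d.insert key ((d.getD key (0, 0)).1 + 1, (d.getD key (0, 0)).2) := rfl

theorem items_countA (xs : List Int) :
    (countA xs).items = (PySem.Set.ofList xs).map (pairA xs) := by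
  induction xs using List.reverseRecOn with
  | nil => simp [countA, PySem.List.enumerate, PySem.Dict.empty, PySem.Set.ofList]
  | append_singleton xs x ih =>
    have hstep : countA (xs ++ [x]) =
        (fun c (p : Int × Int) =>
          let c := if c.contains p.2 then c else c.insert p.2 ((0 : Int), p.1)
          c.modify p.2 (0, 0) (fun v => (v.1 + 1, v.2))) (countA xs) ((0 : Int) + xs.length, x) := by
      unfold countA
      rw [enumerate_snoc, List.foldl_append]
      rfl
    have hkeys : (countA xs).keys = PySem.Set.ofList xs := by
      show (countA xs).items.map (·.1) = _
      rw [ih, List.map_map]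
      have hid : ((·.1 : Int × (Int × Int) → Int) ∘ pairA xs) = id := funext fun k => rfl
      rw [hid, List.map_id]
    have hnodup : (countA xs).keys.Nodup := by rw [hkeys]; exact PySem.Set.nodup_ofList xs
    by_cases hx : x ∈ xs
    · have hcont : (countA xs).contains x = true := by
        rw [PySem.Dict.contains_iff_mem_keys, hkeys, PySem.Set.mem_ofList]; exact hx
      have hgd : (countA xs).getD x (0, 0) = (cntI xs x, idxI xs x) := by
        apply PySem.Dict.getD_of_mem_items (countA xs) _ hnodup
        rw [ih]
        exact List.mem_map_of_mem ((PySem.Set.mem_ofList xs x).mpr hx)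
      rw [hstep]
      simp only [hcont, if_pos]
      rw [modify_eq_insert, PySem.Dict.items_insert_of_contains _ _ hcont, ih]
      rw [PySem.Set.ofList_append_singleton,
        PySem.Set.add_of_mem ((PySem.Set.mem_ofList xs x).mpr hx)]
      rw [List.map_map]
      apply List.map_congr_left
      intro k hk
      have hkxs : k ∈ xs := (PySem.Set.mem_ofList xs k).mp hk
      by_cases hkx : k = x
      · subst hkx
        show (if (pairA xs k).1 == k then
            (k, ((countA xs).getD k (0, 0)).1 + 1, ((countA xs).getD k (0, 0)).2)
          else pairA xs k) = pairA (xs ++ [k]) k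
        rw [hgd]
        simp only [pairA, beq_self_eq_true, if_true]
        rw [cnt_snoc_self, idx_snoc_mem xs k hkxs]
      · show (if (pairA xs k).1 == x then
            (x, ((countA xs).getD x (0, 0)).1 + 1, ((countA xs).getD x (0, 0)).2)
          else pairA xs k) = pairA (xs ++ [x]) k
        rw [if_neg (by simp [pairA, hkx])]
        simp only [pairA]
        rw [cnt_snoc_ne xs hkx, idx_snoc_mem xs x hkxs]
    · have hcont : (countA xs).contains x = false := by
        rw [Bool.eq_false_iff, Ne, PySem.Dict.contains_iff_mem_keys, hkeys, PySem.Set.mem_ofList]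
        exact hx
      rw [hstep]
      simp only [hcont, Bool.false_eq_true, if_false]
      rw [modify_eq_insert, PySem.Dict.getD_insert_self, PySem.Dict.insert_insert_self]
      rw [PySem.Dict.items_insert_of_not_contains _ _ hcont, ih]
      rw [PySem.Set.ofList_append_singleton,
        PySem.Set.add_of_not_mem (by rw [PySem.Set.mem_ofList]; exact hx)]
      rw [List.map_append]
      congr 1
      · apply List.map_congr_left
        intro k hk
        have hkxs : k ∈ xs := (PySem.Set.mem_ofList xs k).mp hk
        have hkx : k ≠ x := fun h => hx (h ▸ hkxs)
        simp only [pairA]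
        rw [cnt_snoc_ne xs hkx, idx_snoc_mem xs x hkxs]
      · simp only [List.map_cons, List.map_nil, pairA]
        rw [cnt_snoc_self, idx_snoc_self xs hx]
        have hc : cntI xs x = 0 := by
          simp [cntI, List.count_eq_zero_of_not_mem hx]
        rw [hc]
        norm_num

theorem keys_countA (xs : List Int) : (countA xs).keys = PySem.Set.ofList xs := by
  show (countA xs).items.map (·.1) = _
  rw [items_countA, List.map_map]
  have hid : ((·.1 : Int × (Int × Int) → Int) ∘ pairA xs) = id := funext fun k => rfl
  rw [hid, List.map_id]

theorem getD_countA {xs : List Int} {k : Int} (h : k ∈ xs) :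
    (countA xs).getD k (0, 0) = (cntI xs k, idxI xs k) := by
  apply PySem.Dict.getD_of_mem_items (countA xs) _
    (by rw [keys_countA]; exact PySem.Set.nodup_ofList xs)
  rw [items_countA]
  exact List.mem_map_of_mem ((PySem.Set.mem_ofList xs k).mpr h)

theorem idxI_lt_length {xs : List Int} {k : Int} (h : k ∈ xs) : idxI xs k < (xs.length : Int) := by
  obtain ⟨j, hj, hlt⟩ := index?_mem_lt h
  unfold idxI
  rw [hj]
  simpa using by omega

theorem idxI_pairwise (xs : List Int) :
    (PySem.Set.ofList xs).Pairwise (fun a b => idxI xs a < idxI xs b) := by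
  induction xs using List.reverseRecOn with
  | nil => simp [PySem.Set.ofList]
  | append_singleton xs x ih =>
    rw [PySem.Set.ofList_append_singleton]
    by_cases hx : x ∈ xs
    · rw [PySem.Set.add_of_mem ((PySem.Set.mem_ofList xs x).mpr hx)]
      refine ih.imp_of_mem ?_
      intro a b ha hb hab
      have ha' := (PySem.Set.mem_ofList xs a).mp ha
      have hb' := (PySem.Set.mem_ofList xs b).mp hb
      rw [idx_snoc_mem xs x ha', idx_snoc_mem xs x hb']
      exact hab
    · rw [PySem.Set.add_of_not_mem (by rw [PySem.Set.mem_ofList]; exact hx)]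
      rw [List.pairwise_append]
      refine ⟨?_, List.pairwise_singleton _ _, ?_⟩
      · refine ih.imp_of_mem ?_
        intro a b ha hb hab
        have ha' := (PySem.Set.mem_ofList xs a).mp ha
        have hb' := (PySem.Set.mem_ofList xs b).mp hb
        rw [idx_snoc_mem xs x ha', idx_snoc_mem xs x hb']
        exact hab
      · intro a ha b hb
        rw [List.mem_singleton] at hb
        rw [hb]
        have ha' := (PySem.Set.mem_ofList xs a).mp ha
        rw [idx_snoc_mem xs x ha', idx_snoc_self xs hx]
        exact idxI_lt_length ha'

theorem sorted2_lex {α : Type} (xs : List α) (k1 k2 : α → Int) :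
    PySem.List.sorted2 xs k1 k2 = PySem.List.sorted xs (fun x => toLex (k1 x, k2 x)) := by
  have hbefore : (fun a b => decide (k1 a < k1 b) || !decide (k1 b < k1 a) && decide (k2 a < k2 b))
      = (fun a b => decide (toLex (k1 a, k2 a) < toLex (k1 b, k2 b))) := by
    funext a b
    have hiff : (toLex (k1 a, k2 a) < toLex (k1 b, k2 b)) ↔
        (k1 a < k1 b ∨ (k1 a = k1 b ∧ k2 a < k2 b)) := Prod.Lex.lt_iff
    rw [Bool.eq_iff_iff]
    simp only [Bool.or_eq_true, Bool.and_eq_true, Bool.not_eq_true', decide_eq_true_eq,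
      decide_eq_false_iff_not, hiff]
    omega
  show List.foldl (fun acc x => PySem.List.insertBy
      (fun a b => decide (k1 a < k1 b) || !decide (k1 b < k1 a) && decide (k2 a < k2 b)) x acc) [] xs
    = List.foldl (fun acc x => PySem.List.insertBy
      (fun a b => decide (toLex (k1 a, k2 a) < toLex (k1 b, k2 b))) x acc) [] xs
  rw [hbefore]


theorem values_counter (xs : List Int) :
    (PySem.Dict.counter xs).values = (PySem.Set.ofList xs).map (fun k => cntI xs k) := by
  have h := PySem.Dict.items_counter xs
  simp only [PySem.Dict.values, h, List.map_map]
  rfl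

def maxfD (xs : List Int) : Int := PySem.List.maxD (PySem.Dict.counter xs).values (fun v => v) 0

theorem cnt_pos {xs : List Int} {k : Int} (h : k ∈ xs) : 1 ≤ cntI xs k := by
  have := List.count_pos_iff.mpr h
  unfold cntI; omega

theorem cnt_le_maxfD {xs : List Int} {k : Int} (h : k ∈ xs) : cntI xs k ≤ maxfD xs := by
  unfold maxfD PySem.List.maxD
  have hmem : cntI xs k ∈ (PySem.Dict.counter xs).values := by
    rw [values_counter]
    exact List.mem_map_of_mem ((PySem.Set.mem_ofList xs k).mpr h)
  cases hm : PySem.List.max? (PySem.Dict.counter xs).values (fun v => v) with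
  | none => rw [PySem.List.max?_eq_none_iff] at hm; rw [hm] at hmem; simp at hmem
  | some m => simpa using PySem.List.max?_isMax hm _ hmem

def resultB (xs : List Int) : List Int :=
  (PySem.List.pyRange (maxfD xs) 0 (-1)).flatMap
    (fun c => (PySem.Set.ofList xs).filter (fun k => decide (cntI xs k = c)))

theorem pyRange_desc (a : Int) :
    PySem.List.pyRange a 0 (-1) = (List.range a.toNat).map (fun k : Nat => a - (k : Int)) := by
  unfold PySem.List.pyRange
  rw [if_neg (by norm_num : ¬(-1:Int) = 0)]
  rw [if_neg (by norm_num : ¬(0:Int) < -1)]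
  by_cases h : (0:Int) < a
  · rw [if_pos h]
    have h2 : (a - 0 + -(-1) - 1) / -(-1) = a := by norm_num
    rw [h2]
    exact List.map_congr_left (fun k _ => by ring)
  · rw [if_neg h]
    have : a.toNat = 0 := by omega
    simp [this]

theorem mem_pyRange_desc {a c : Int} : c ∈ PySem.List.pyRange a 0 (-1) ↔ 1 ≤ c ∧ c ≤ a := by
  rw [pyRange_desc]
  simp only [List.mem_map]
  constructor
  · rintro ⟨k, hk, rfl⟩; rw [List.mem_range] at hk; omega
  · rintro ⟨h1, h2⟩; exact ⟨(a - c).toNat, by rw [List.mem_range]; omega, by omega⟩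

theorem pyRange_desc_pairwise (a : Int) :
    (PySem.List.pyRange a 0 (-1)).Pairwise (fun c d => d < c) := by
  rw [pyRange_desc, List.pairwise_map]
  exact List.pairwise_lt_range.imp (fun h => by omega)

theorem resultB_pairwise (xs : List Int) :
    (resultB xs).Pairwise (fun a b =>
      toLex (-(cntI xs a), idxI xs a) < toLex (-(cntI xs b), idxI xs b)) := by
  unfold resultB
  rw [List.flatMap_def, List.pairwise_flatten]
  constructor
  · intro l hl
    rw [List.mem_map] at hl
    obtain ⟨c, _, rfl⟩ := hl
    have hsub : ((PySem.Set.ofList xs).filter (fun k => decide (cntI xs k = c))).Sublist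
        (PySem.Set.ofList xs) := List.filter_sublist
    have hpw := (idxI_pairwise xs).sublist hsub
    refine hpw.imp_of_mem ?_
    intro a b ha hb hab
    have hca := of_decide_eq_true (List.mem_filter.mp ha).2
    have hcb := of_decide_eq_true (List.mem_filter.mp hb).2
    rw [Prod.Lex.lt_iff]
    right
    exact ⟨by simp [hca, hcb], by simpa using hab⟩
  · have hpw := pyRange_desc_pairwise (maxfD xs)
    rw [List.pairwise_map]
    refine hpw.imp_of_mem ?_
    intro c d _ _ hdc a ha b hb
    have hca := of_decide_eq_true (List.mem_filter.mp ha).2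
    have hcb := of_decide_eq_true (List.mem_filter.mp hb).2
    rw [Prod.Lex.lt_iff]
    left
    show (-(cntI xs a) : Int) < -(cntI xs b)
    omega

theorem resultB_perm (xs : List Int) : (resultB xs).Perm (PySem.Set.ofList xs) := by
  have hnodup : (resultB xs).Nodup := by
    have := resultB_pairwise xs
    exact this.imp (fun {a b} h => by
      rintro rfl
      exact lt_irrefl _ h)
  rw [List.perm_ext_iff_of_nodup hnodup (PySem.Set.nodup_ofList xs)]
  intro k
  unfold resultB
  rw [List.mem_flatMap]
  constructor
  · rintro ⟨c, _, hk⟩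
    exact List.mem_of_mem_filter hk
  · intro hk
    have hk' := (PySem.Set.mem_ofList xs k).mp hk
    refine ⟨cntI xs k, ?_, ?_⟩
    · rw [mem_pyRange_desc]
      exact ⟨cnt_pos hk', cnt_le_maxfD hk'⟩
    · rw [List.mem_filter]
      exact ⟨hk, by simp⟩

theorem sorted_eq_resultB (xs : List Int) :
    PySem.List.sorted (PySem.Set.ofList xs)
      (fun x => toLex (-((countA xs).getD x (0, 0)).1, ((countA xs).getD x (0, 0)).2)) =
      resultB xs := by
  apply PySem.List.sorted_eq_of_perm_of_pairwise_lt
  · exact resultB_perm xs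
  · have := resultB_pairwise xs
    refine this.imp_of_mem ?_
    intro a b ha hb hab
    have ha' : a ∈ xs := by
      have := (resultB_perm xs).mem_iff.mp ha
      exact (PySem.Set.mem_ofList xs a).mp this
    have hb' : b ∈ xs := by
      have := (resultB_perm xs).mem_iff.mp hb
      exact (PySem.Set.mem_ofList xs b).mp this
    rw [getD_countA ha', getD_countA hb']
    exact hab

theorem flatMap_congr_mem {α β : Type} {l : List α} {f g : α → List β}
    (h : ∀ x ∈ l, f x = g x) : l.flatMap f = l.flatMap g := by
  simp only [List.flatMap_def]
  exact congrArg List.flatten (List.map_congr_left h)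

theorem getD_bfold (l : List (Int × Int)) (bs : List (List Int)) (j : Nat) (hj : j < bs.length) :
    (l.foldl (fun bs p => bs.modify p.2.toNat (fun b => b ++ [p.1])) bs).getD j [] =
      bs.getD j [] ++ (l.filter (fun p => decide (p.2.toNat = j))).map (·.1) := by
  induction l generalizing bs with
  | nil => simp
  | cons p t ih =>
    simp only [List.foldl_cons, List.filter_cons]
    rw [ih _ (by simp [hj])]
    by_cases hp : p.2.toNat = j
    · simp only [hp, decide_true, if_pos]
      rw [List.getD_eq_getElem _ _ (by simp [hj]), List.getElem_modify]
      simp [List.getElem?_eq_getElem hj]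
    · simp only [hp, decide_false]
      rw [List.getD_eq_getElem _ _ (by simp [hj]), List.getElem_modify]
      simp [hp, List.getElem?_eq_getElem hj]

def bucketsL (xs : List Int) : List (List Int) :=
  (PySem.Dict.counter xs).items.foldl (fun bs p => bs.modify p.2.toNat (fun b => b ++ [p.1]))
    (List.replicate ((maxfD xs) + 1).toNat [])

theorem bucketsL_getD {xs : List Int} {c : Int} (h1 : 1 ≤ c) (h2 : c ≤ maxfD xs) :
    (bucketsL xs).getD c.toNat [] =
      (PySem.Set.ofList xs).filter (fun k => decide (cntI xs k = c)) := by
  unfold bucketsL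
  rw [getD_bfold _ _ _ (by simp; omega)]
  rw [List.getD_eq_getElem _ _ (by simp; omega), List.getElem_replicate]
  rw [PySem.Dict.items_counter, List.filter_map, List.map_map]
  rw [show ((·.1 : Int × Int → Int) ∘ fun k => (k, (List.count k xs : Int))) = id from funext fun k => rfl]
  rw [List.map_id, List.nil_append]
  apply List.filter_congr
  intro k hk
  have hk' : k ∈ xs := (PySem.Set.mem_ofList xs k).mp hk
  have hpos := cnt_pos hk'
  simp only [Function.comp]
  rw [decide_eq_decide]
  unfold cntI at *
  omega

theorem solve_eq (xs : List Int) : solve xs = solve_alt xs := by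
  have hA : solve xs = (PySem.List.pyRange (maxfD xs) 0 (-1)).flatMap
      (fun c => ((PySem.Set.ofList xs).filter (fun k => decide (cntI xs k = c))).flatMap
        (fun num => List.replicate c.toNat num)) := by
    show (PySem.List.sorted2 (countA xs).keys
        (fun x => -((countA xs).getD x (0, 0)).1) (fun x => ((countA xs).getD x (0, 0)).2)).foldl
        (fun answer num => answer ++ PySem.List.pyRepeat [num] ((countA xs).getD num (0, 0)).1) [] = _
    rw [keys_countA, sorted2_lex, sorted_eq_resultB]
    rw [PySem.List.foldl_congr_mem _ _
      (fun answer num => answer ++ List.replicate (cntI xs num).toNat num) []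
      (by
        intro acc num hnum
        have h' : num ∈ xs := (PySem.Set.mem_ofList xs num).mp ((resultB_perm xs).mem_iff.mp hnum)
        rw [getD_countA h', PySem.List.pyRepeat_singleton])]
    rw [PySem.List.foldl_append_eq_flatMap, List.nil_append]
    unfold resultB
    rw [List.flatMap_assoc]
    apply flatMap_congr_mem
    intro c _
    apply flatMap_congr_mem
    intro num hnum
    have hc : cntI xs num = c := of_decide_eq_true (List.mem_filter.mp hnum).2
    rw [hc]
  have hB : solve_alt xs = (PySem.List.pyRange (maxfD xs) 0 (-1)).flatMap
      (fun c => ((PySem.Set.ofList xs).filter (fun k => decide (cntI xs k = c))).flatMap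
        (fun num => List.replicate c.toNat num)) := by
    show (PySem.List.pyRange (maxfD xs) 0 (-1)).foldl
        (fun answer c => ((bucketsL xs).getD c.toNat []).foldl
          (fun answer num => answer ++ PySem.List.pyRepeat [num] c) answer) [] = _
    rw [show (fun answer c => ((bucketsL xs).getD c.toNat []).foldl
          (fun answer num => answer ++ PySem.List.pyRepeat [num] c) answer)
        = fun answer c => answer ++ ((bucketsL xs).getD c.toNat []).flatMap
            (fun num => PySem.List.pyRepeat [num] c) from
      funext fun answer => funext fun c => PySem.List.foldl_append_eq_flatMap _ _ _]
    rw [PySem.List.foldl_append_eq_flatMap, List.nil_append]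
    apply flatMap_congr_mem
    intro c hc
    rw [mem_pyRange_desc] at hc
    rw [bucketsL_getD hc.1 hc.2]
    apply flatMap_congr_mem
    intro num _
    rw [PySem.List.pyRepeat_singleton]
  rw [hA, hB]

-- ===== VERDICT (by name: the statement is the Claim_ definition above) =====
theorem solve_spec : Claim_equal_solve := by
  intro inputs _
  unfold Spec_solve
  exact solve_eq inputs
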